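-- pv_equiv track=rewrite | github.com/quant1x/q1x-base | q1x/core/w1.py | find_monotonic_peaks_right
-- ===== SOURCE A (Python) =====
-- def find_monotonic_peaks_right(data_list):
--     """右侧单调上升波峰检测（从右向左）"""
--     if len(data_list) == 0:
--         return []
--
--     PR = []
--     Prast = data_list[-1]
--     last_added = False
--
--     for i in range(len(data_list) - 2, -1, -1):
--         current = data_list[i]
--         if current > Prast:
--             Prast = current
--             last_added = False
--         else:
--             if not last_added:
--                 PR.append(Prast)
--                 last_added = True
--
--     if not last_added:
--         if len(PR) == 0 or Prast > PR[-1]: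
--             PR.append(Prast)
--
--     PR.reverse()
--     return PR
-- ===== SOURCE B (Python) =====
-- def find_monotonic_peaks_right(data_list):
--     """右侧单调上升波峰检测: suffix-max table + forward filtering pass."""
--     n = len(data_list)
--     if n == 0:
--         return []
--     # right_max[j] = max(data_list[j+1:]), or None when nothing is to the right
--     right_max = [None] * n
--     m = None
--     for j in range(n - 1, -1, -1):
--         right_max[j] = m
--         m = data_list[j] if m is None or data_list[j] > m else m
--     res = []
--     prev = None
--     for x, r in zip(data_list, right_max):
--         if (r is None or x > r) and (prev is None or prev <= x):
--             res.append(x)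
--         prev = x
--     return res
-- ===== Notes on version B (the rewrite author's own statement) =====
-- stated objective: alternative
-- what changed: Replaces the stateful right-to-left scan (running max + last_added flag + final reverse) by two independent passes: a backward pass materialising a suffix-maximum table, then a forward filtering pass that keeps each element that is a strict suffix maximum and not greater than its left neighbour's value bound (prev <= x or first element); no reverse needed.
import Mathlib
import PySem

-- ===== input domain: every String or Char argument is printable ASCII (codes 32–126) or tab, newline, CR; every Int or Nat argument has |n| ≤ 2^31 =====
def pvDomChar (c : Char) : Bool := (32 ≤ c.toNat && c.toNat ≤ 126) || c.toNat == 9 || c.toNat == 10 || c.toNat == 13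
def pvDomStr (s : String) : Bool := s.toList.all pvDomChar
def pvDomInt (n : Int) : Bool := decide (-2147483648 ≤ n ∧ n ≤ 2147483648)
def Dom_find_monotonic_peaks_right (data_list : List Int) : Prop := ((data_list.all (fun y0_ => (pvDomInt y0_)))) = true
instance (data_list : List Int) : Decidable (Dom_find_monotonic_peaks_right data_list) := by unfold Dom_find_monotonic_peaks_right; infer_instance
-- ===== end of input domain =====

-- B replaces A's stateful right-to-left scan by a suffix-max table plus a forward
-- filtering pass (objective: alternative decomposition, same O(n) cost).

-- ===== PORT A =====
-- One iteration of A's loop body on the state (PR, Prast, last_added); branches in order.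
def stepA (current : Int) (st : List Int × Int × Bool) : List Int × Int × Bool :=
  let (PR, Prast, last_added) := st
  if current > Prast then (PR, current, false)
  else if !last_added then (PR ++ [Prast], Prast, true)
  else (PR, Prast, last_added)

-- A's loop visits data_list[n-2], …, data_list[0] right-to-left; the state after the
-- whole loop on x :: xs is one loop step (on x) applied to the state for xs, with the
-- initial state ([], data_list[-1], False) reached at the singleton.
def loopA : Int → List Int → List Int × Int × Bool
  | x, [] => ([], x, false)
  | x, y :: ys => stepA x (loopA y ys)

def find_monotonic_peaks_right (data_list : List Int) : List Int :=
  match data_list with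
  | [] => []
  | x :: xs =>
    let (PR, Prast, last_added) := loopA x xs
    let PR2 :=
      if last_added then PR
      else
        -- final block: if len(PR)==0 or Prast > PR[-1]: PR.append(Prast)
        match PR.getLast? with
        | none => PR ++ [Prast]
        | some t => if Prast > t then PR ++ [Prast] else PR
    PR2.reverse

-- ===== PORT B =====
-- `x > r` with r possibly None (r is None means "no element to the right").
def topB (x : Int) (r : Option Int) : Bool :=
  match r with | none => true | some v => decide (x > v)

-- `prev is None or prev <= x`.
def leB (prev : Option Int) (x : Int) : Bool :=
  match prev with | none => true | some p => decide (p ≤ x)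

-- Backward pass of Source B: returns (right_max table, running max m as an Option).
-- m-update mirrors `m = data_list[j] if m is None or data_list[j] > m else m`.
def rmAux : List Int → List (Option Int) × Option Int
  | [] => ([], none)
  | x :: xs =>
    let (tbl, m) := rmAux xs
    (m :: tbl, some (match m with | none => x | some v => if x > v then x else v))

-- Forward filtering pass of Source B over zip(data_list, right_max), carrying prev.
def filtB : Option Int → List (Int × Option Int) → List Int
  | _, [] => []
  | prev, (x, r) :: rest =>
    if topB x r && leB prev x then x :: filtB (some x) rest
    else filtB (some x) rest

def find_monotonic_peaks_right_alt (data_list : List Int) : List Int :=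
  match data_list with
  | [] => []
  | _ => filtB none (data_list.zip (rmAux data_list).1)

-- ===== PRECONDITION & SPEC =====
def Spec_find_monotonic_peaks_right (data_list : List Int) (out : List Int) : Prop := out = find_monotonic_peaks_right_alt data_list
instance (data_list : List Int) (out : List Int) : Decidable (Spec_find_monotonic_peaks_right data_list out) := by unfold Spec_find_monotonic_peaks_right; infer_instance

-- ===== CLAIM (what is proved, stated in full; the proofs are below) =====
def Claim_equal_find_monotonic_peaks_right : Prop := ∀ (data_list : List Int), Dom_find_monotonic_peaks_right data_list → Spec_find_monotonic_peaks_right data_list (find_monotonic_peaks_right data_list)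

-- ===== LEMMAS AND PROOFS =====

-- Maximum of a list as an Option, with the same combine as rmAux's running max.
def lmax? : List Int → Option Int
  | [] => none
  | x :: xs => some (match lmax? xs with | none => x | some v => if x > v then x else v)

-- Common reference functions: Gref l = the peak list of l; Dref l = the peak list of l in a
-- context where l's head has a strictly larger left neighbour (so the head never counts).
mutual
def Gref : List Int → List Int
  | [] => []
  | x :: xs => if topB x (lmax? xs) then x :: Dref xs else Gref xs
def Dref : List Int → List Int
  | [] => []
  | x :: xs => if topB x (lmax? xs) then Dref xs else Gref xs
end

theorem lmax?_cons (x : Int) (xs : List Int) :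
    lmax? (x :: xs) = some (match lmax? xs with | none => x | some v => if x > v then x else v) := by
  rw [lmax?]

theorem Gref_cons (x : Int) (xs : List Int) :
    Gref (x :: xs) = if topB x (lmax? xs) then x :: Dref xs else Gref xs := by
  rw [Gref]

theorem Dref_cons (x : Int) (xs : List Int) :
    Dref (x :: xs) = if topB x (lmax? xs) then Dref xs else Gref xs := by
  rw [Dref]

theorem topB_true (x : Int) (xs : List Int) (m : Int) (hm : lmax? xs = some m) (h : x > m) :
    topB x (lmax? xs) = true := by
  rw [hm]; simpa [topB] using h

theorem topB_false (x : Int) (xs : List Int) (m : Int) (hm : lmax? xs = some m) (h : ¬ x > m) :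
    topB x (lmax? xs) = false := by
  rw [hm]; simpa [topB] using h

theorem loopA_inv (xs : List Int) : ∀ (x : Int) (PR : List Int) (m : Int) (la : Bool),
    loopA x xs = (PR, m, la) →
    lmax? (x :: xs) = some m ∧
    (la = false → PR.reverse = Dref (x :: xs) ∧ (∀ p ∈ PR, p < m) ∧
      Gref (x :: xs) = m :: Dref (x :: xs)) ∧
    (la = true → PR.reverse = Gref (x :: xs) ∧ (∀ p ∈ PR, p ≤ m) ∧
      Gref (x :: xs) = Dref (x :: xs)) := by
  induction xs with
  | nil =>
    intro x PR m la h
    have h' : (([] : List Int), x, false) = (PR, m, la) := h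
    injection h' with hA hBC
    injection hBC with hB hC
    subst hA; subst hB; subst hC
    have htop : topB x (lmax? ([] : List Int)) = true := rfl
    refine ⟨?_, ?_, ?_⟩
    · rw [lmax?_cons]; rfl
    · intro _
      refine ⟨?_, ?_, ?_⟩
      · rw [Dref_cons, if_pos htop]; rfl
      · intro p hp; cases hp
      · rw [Gref_cons, if_pos htop, Dref_cons, if_pos htop]
    · intro hc; cases hc
  | cons y ys ih =>
    intro x PR m la h
    rcases hprev : loopA y ys with ⟨PR0, m0, la0⟩
    obtain ⟨hm, hF, hT⟩ := ih y PR0 m0 la0 hprev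
    have hl : loopA x (y :: ys) = stepA x (PR0, m0, la0) := by rw [loopA, hprev]
    by_cases hxm : x > m0
    · -- current > Prast: state becomes (PR0, x, false)
      have hst : stepA x (PR0, m0, la0) = (PR0, x, false) := by simp [stepA, hxm]
      have h' : (PR0, x, false) = (PR, m, la) := by rw [← hst, ← hl]; exact h
      injection h' with hA hBC
      injection hBC with hB hC
      subst hA; subst hB; subst hC
      have htop : topB x (lmax? (y :: ys)) = true := topB_true x _ m0 hm hxm
      have hD : Dref (x :: y :: ys) = Dref (y :: ys) := by rw [Dref_cons, if_pos htop]
      have hG : Gref (x :: y :: ys) = x :: Dref (y :: ys) := by rw [Gref_cons, if_pos htop]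
      have hPRD : PR0.reverse = Dref (y :: ys) := by
        cases la0 with
        | false => exact (hF rfl).1
        | true => rw [← (hT rfl).2.2]; exact (hT rfl).1
      have hlt : ∀ p ∈ PR0, p < x := by
        intro p hp
        cases la0 with
        | false => exact lt_trans ((hF rfl).2.1 p hp) hxm
        | true => exact lt_of_le_of_lt ((hT rfl).2.1 p hp) hxm
      refine ⟨?_, ?_, ?_⟩
      · rw [lmax?_cons, hm]; simp [hxm]
      · intro _
        exact ⟨by rw [hD]; exact hPRD, hlt, by rw [hG, hD]⟩
      · intro hc; cases hc
    · -- current ≤ Prast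
      have htop : topB x (lmax? (y :: ys)) = false := topB_false x _ m0 hm hxm
      have hD : Dref (x :: y :: ys) = Gref (y :: ys) := by
        rw [Dref_cons, if_neg (by simp [htop])]
      have hG : Gref (x :: y :: ys) = Gref (y :: ys) := by
        rw [Gref_cons, if_neg (by simp [htop])]
      have hlx : lmax? (x :: y :: ys) = some m0 := by
        rw [lmax?_cons, hm]; simp [hxm]
      cases la0 with
      | true =>
        have hst : stepA x (PR0, m0, true) = (PR0, m0, true) := by simp [stepA, hxm]
        have h' : (PR0, m0, true) = (PR, m, la) := by rw [← hst, ← hl]; exact h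
        injection h' with hA hBC
        injection hBC with hB hC
        subst hA; subst hB; subst hC
        obtain ⟨h1, h2, h3⟩ := hT rfl
        refine ⟨hlx, ?_, ?_⟩
        · intro hc; cases hc
        · intro _
          exact ⟨by rw [hG]; exact h1, h2, by rw [hG, hD, h3]⟩
      | false =>
        have hst : stepA x (PR0, m0, false) = (PR0 ++ [m0], m0, true) := by
          simp [stepA, hxm]
        have h' : (PR0 ++ [m0], m0, true) = (PR, m, la) := by rw [← hst, ← hl]; exact h
        injection h' with hA hBC
        injection hBC with hB hC
        subst hA; subst hB; subst hC
        obtain ⟨h1, h2, h3⟩ := hF rfl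
        refine ⟨hlx, ?_, ?_⟩
        · intro hc; cases hc
        · intro _
          refine ⟨?_, ?_, ?_⟩
          · rw [hG, h3, List.reverse_append]
            simp [h1]
          · intro p hp
            rcases List.mem_append.mp hp with hp | hp
            · exact le_of_lt (h2 p hp)
            · simp at hp; omega
          · rw [hG, hD]

-- A computes the reference function Gref.
theorem portA_eq_Gref (l : List Int) : find_monotonic_peaks_right l = Gref l := by
  cases l with
  | nil => rfl
  | cons x xs =>
    rcases h : loopA x xs with ⟨PR, m, la⟩
    obtain ⟨hm, hF, hT⟩ := loopA_inv xs x PR m la h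
    simp only [find_monotonic_peaks_right, h]
    cases la with
    | true =>
      simpa using (hT rfl).1
    | false =>
      obtain ⟨h1, h2, h3⟩ := hF rfl
      rcases hlast : PR.getLast? with _ | t
      · have hPRnil : PR = [] := List.getLast?_eq_none_iff.mp hlast
        subst hPRnil
        have h1' : Dref (x :: xs) = [] := by simpa using h1
        simp [h3, h1']
      · have ht : t ∈ PR := List.mem_of_getLast? hlast
        have hmt : m > t := h2 t ht
        simp only [Bool.false_eq_true, if_false, hlast, if_pos hmt, List.reverse_append,
          List.reverse_cons, List.reverse_nil, List.nil_append, List.singleton_append, h1, h3]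

-- The backward pass's running max is lmax?.
theorem rmAux_snd (l : List Int) : (rmAux l).2 = lmax? l := by
  induction l with
  | nil => rfl
  | cons x xs ih => simp [rmAux, lmax?_cons, ih]

-- The forward pass computes Gref (prev = none) resp. the prev-guarded variant.
theorem filtB_eq (l : List Int) :
    filtB none (l.zip (rmAux l).1) = Gref l ∧
    ∀ p : Int, filtB (some p) (l.zip (rmAux l).1) =
      (if (match lmax? l with | none => false | some v => decide (p > v)) = true then Dref l else Gref l) := by
  induction l with
  | nil => exact ⟨rfl, fun p => rfl⟩
  | cons x xs ih =>
    obtain ⟨ih0, ihp⟩ := ih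
    have hz : (x :: xs).zip (rmAux (x :: xs)).1 = (x, lmax? xs) :: xs.zip (rmAux xs).1 := by
      simp [rmAux, rmAux_snd]
    have hstep : ∀ pr, filtB pr ((x :: xs).zip (rmAux (x :: xs)).1) =
        (if topB x (lmax? xs) && leB pr x then
          x :: filtB (some x) (xs.zip (rmAux xs).1)
        else filtB (some x) (xs.zip (rmAux xs).1)) := by
      intro pr; rw [hz, filtB]
    have hrec := ihp x
    rcases hm : lmax? xs with _ | v
    · -- xs = []
      have hxs : xs = [] := by
        cases xs with
        | nil => rfl
        | cons y ys => rw [lmax?_cons] at hm; cases hm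
      subst hxs
      have htop : topB x (lmax? ([] : List Int)) = true := rfl
      have hG : Gref [x] = [x] := by rw [Gref_cons, if_pos htop, Dref]
      have hD : Dref [x] = [] := by rw [Dref_cons, if_pos htop, Dref]
      have hmax : lmax? [x] = some x := by rw [lmax?_cons]; rfl
      constructor
      · rw [hstep, htop]
        simp [leB, filtB, rmAux, hG]
      · intro p
        rw [hstep, htop, hmax, hG, hD]
        by_cases hpx : p ≤ x
        · simp [leB, hpx, filtB, rmAux, show ¬ p > x by omega]
        · simp [leB, hpx, filtB, rmAux, show p > x by omega]
    · rw [hm] at hrec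
      have hmax : lmax? (x :: xs) = some (if x > v then x else v) := by
        rw [lmax?_cons, hm]
      by_cases hxv : x > v
      · -- x is a strict suffix max; max (x::xs) = x
        have htop : topB x (lmax? xs) = true := topB_true x _ v hm hxv
        have hG : Gref (x :: xs) = x :: Dref xs := by rw [Gref_cons, if_pos htop]
        have hD : Dref (x :: xs) = Dref xs := by rw [Dref_cons, if_pos htop]
        have hrec' : filtB (some x) (xs.zip (rmAux xs).1) = Dref xs := by
          rw [hrec, if_pos (by simpa using hxv)]
        constructor
        · rw [hstep, htop, hrec']
          simp [leB, hG]
        · intro p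
          rw [hstep, htop, hrec', hmax, if_pos hxv]
          by_cases hpx : p ≤ x
          · simp [leB, hpx, hG, hD, show ¬ p > x by omega]
          · simp [leB, hpx, hG, hD, show p > x by omega]
      · -- x not a strict suffix max; max (x::xs) = v
        have htop : topB x (lmax? xs) = false := topB_false x _ v hm hxv
        have hG : Gref (x :: xs) = Gref xs := by rw [Gref_cons, if_neg (by simp [htop])]
        have hD : Dref (x :: xs) = Gref xs := by rw [Dref_cons, if_neg (by simp [htop])]
        have hrec' : filtB (some x) (xs.zip (rmAux xs).1) = Gref xs := by
          rw [hrec, if_neg (by simpa using hxv)]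
        constructor
        · rw [hstep, htop, hrec']
          rw [hG]
          simp
        · intro p
          rw [hstep, htop, hrec', hmax, if_neg hxv, hG, hD]
          simp

theorem portB_eq_Gref (l : List Int) : find_monotonic_peaks_right_alt l = Gref l := by
  cases l with
  | nil => rfl
  | cons x xs =>
    show filtB none ((x :: xs).zip (rmAux (x :: xs)).1) = Gref (x :: xs)
    exact (filtB_eq (x :: xs)).1

-- ===== VERDICT (by name: the statement is the Claim_ definition above) =====
theorem find_monotonic_peaks_right_spec : Claim_equal_find_monotonic_peaks_right := by
  intro l _
  unfold Spec_find_monotonic_peaks_right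
  rw [portA_eq_Gref, portB_eq_Gref]
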